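-- pv_equiv track=rewrite | github.com/XSafeAI/XSafeClaw | xs/src/xsafeclaw/services/memory_scan_service.py | _parse_scan_output
-- ===== SOURCE A (Python) =====
-- def _parse_scan_output(text: str) -> dict[str, str]:
--     result: dict[str, str] = {"status": "error", "risk_type": "none", "details": ""}
--     for line in text.splitlines():
--         line = line.strip()
--         lower = line.lower()
--         if lower.startswith("verdict:"):
--             verdict = line.split(":", 1)[1].strip().lower()
--             result["status"] = "safe" if verdict == "safe" else ("unsafe" if verdict == "unsafe" else "error")
--         elif lower.startswith("risk_type:"):
--             result["risk_type"] = line.split(":", 1)[1].strip()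
--         elif lower.startswith("details:"):
--             result["details"] = line.split(":", 1)[1].strip()
--     return result
-- ===== SOURCE B (Python) =====
-- def _parse_scan_output(text: str) -> dict[str, str]:
--     # Phase 1: index every colon-separated line (last occurrence wins) under its lowercased key.
--     fields: dict[str, str] = {}
--     for raw in text.splitlines():
--         line = raw.strip()
--         parts = line.split(":", 1)
--         if len(parts) == 2:
--             fields[parts[0].lower()] = parts[1].strip()
--     # Phase 2: assemble the result from the index.
--     verdict = fields.get("verdict", "").lower()
--     status = verdict if verdict in ("safe", "unsafe") else "error"
--     return {
--         "status": status,
--         "risk_type": fields.get("risk_type", "none"),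
--         "details": fields.get("details", ""),
--     }
-- ===== Notes on version B (the rewrite author's own statement) =====
-- stated objective: alternative
-- what changed: Replaced the per-line verdict/risk_type/details if-elif dispatch by a two-phase parse: one pass builds a last-wins index of every colon-separated line keyed by its lowercased key part, then a separate extraction phase assembles status/risk_type/details from that index.
import Mathlib
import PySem

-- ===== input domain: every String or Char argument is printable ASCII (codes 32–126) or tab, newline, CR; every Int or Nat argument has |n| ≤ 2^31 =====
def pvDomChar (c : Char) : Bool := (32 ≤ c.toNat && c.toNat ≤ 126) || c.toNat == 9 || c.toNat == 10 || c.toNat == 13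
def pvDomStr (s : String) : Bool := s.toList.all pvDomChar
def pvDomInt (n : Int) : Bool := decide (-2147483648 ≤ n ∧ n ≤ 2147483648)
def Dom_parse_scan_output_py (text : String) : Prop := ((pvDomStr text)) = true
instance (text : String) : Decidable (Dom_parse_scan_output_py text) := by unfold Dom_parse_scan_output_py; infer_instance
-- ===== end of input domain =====

-- B parses in two phases (index every colon-separated line, then extract the three fields) instead of A's per-line if/elif dispatch; alternative decomposition, same cost.


-- ===== PORT A =====
-- line.split(":", 1)[1].strip(); the [1] (pyGet? … .getD "") is only evaluated under the
-- startswith guard, which guarantees a colon, so pyGet? is some there and the .getD "" default is never used.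
def pvAVal (line : String) : String :=
  PySem.Str.strip ((PySem.List.pyGet? ((PySem.Str.splitMax? line ":" 1).getD []) 1).getD "")

def pvAStep (result : PySem.Dict String String) (line0 : String) : PySem.Dict String String :=
  let line := PySem.Str.strip line0
  let lowerL := PySem.Str.lower line
  if PySem.Str.startswith lowerL "verdict:" then
    let verdict := PySem.Str.lower (pvAVal line)
    result.insert "status" (if verdict = "safe" then "safe" else if verdict = "unsafe" then "unsafe" else "error")
  else if PySem.Str.startswith lowerL "risk_type:" then
    result.insert "risk_type" (pvAVal line)
  else if PySem.Str.startswith lowerL "details:" then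
    result.insert "details" (pvAVal line)
  else result

def parse_scan_output_py (text : String) : List (String × String) :=
  ((PySem.Str.splitlines text).foldl pvAStep
    (PySem.Dict.ofList [("status", "error"), ("risk_type", "none"), ("details", "")])).items

-- ===== PORT B =====
-- phase 1: index every colon-separated line (last wins) under its lowercased key
def pvAltStep (fields : PySem.Dict String String) (raw : String) : PySem.Dict String String :=
  let line := PySem.Str.strip raw
  let parts := (PySem.Str.splitMax? line ":" 1).getD []
  if parts.length = 2 then
    fields.insert (PySem.Str.lower ((PySem.List.pyGet? parts 0).getD ""))
                  (PySem.Str.strip ((PySem.List.pyGet? parts 1).getD ""))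
  else fields

-- phase 2: assemble the result from the index
def parse_scan_output_py_alt (text : String) : List (String × String) :=
  let fields := (PySem.Str.splitlines text).foldl pvAltStep PySem.Dict.empty
  let verdict := PySem.Str.lower (fields.getD "verdict" "")
  let status := if verdict = "safe" ∨ verdict = "unsafe" then verdict else "error"
  [("status", status), ("risk_type", fields.getD "risk_type" "none"), ("details", fields.getD "details" "")]

-- ===== PRECONDITION & SPEC =====
def Spec_parse_scan_output_py (text : String) (out : List (String × String)) : Prop := out = parse_scan_output_py_alt text
instance (text : String) (out : List (String × String)) : Decidable (Spec_parse_scan_output_py text out) := by unfold Spec_parse_scan_output_py; infer_instance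

-- ===== CLAIM (what is proved, stated in full; the proofs are below) =====
def Claim_equal_parse_scan_output_py : Prop := ∀ (text : String), Dom_parse_scan_output_py text → Spec_parse_scan_output_py text (parse_scan_output_py text)

-- ===== LEMMAS AND PROOFS =====

-- A's dict state as a function of B's index dict
def pvAssemble (m : PySem.Dict String String) : PySem.Dict String String :=
  PySem.Dict.mk
    [("status", let v := PySem.Str.lower (m.getD "verdict" ""); if v = "safe" ∨ v = "unsafe" then v else "error"),
     ("risk_type", m.getD "risk_type" "none"),
     ("details", m.getD "details" "")]

theorem pv_go_zero (l cur : List Char) (acc : List (List Char)) (fuel : Nat) :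
    PySem.Chars.splitOnMax.go [':'] fuel 0 l cur acc = ((cur.reverse ++ l) :: acc).reverse := by
  cases fuel with
  | zero => rfl
  | succ f => cases l <;> simp [PySem.Chars.splitOnMax.go]

theorem pv_go_one (cs : List Char) : ∀ (cur : List Char) (acc : List (List Char)) (fuel : Nat), cs.length < fuel →
    PySem.Chars.splitOnMax.go [':'] fuel 1 cs cur acc =
      (if ':' ∈ cs
       then ((cs.dropWhile (· ≠ ':')).tail :: (cur.reverse ++ cs.takeWhile (· ≠ ':')) :: acc).reverse
       else ((cur.reverse ++ cs) :: acc).reverse) := by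
  induction cs with
  | nil =>
    intro cur acc fuel h
    cases fuel with
    | zero => omega
    | succ f => simp [PySem.Chars.splitOnMax.go]
  | cons c rest ih =>
    intro cur acc fuel h
    cases fuel with
    | zero => omega
    | succ f =>
      by_cases hc : c = ':'
      · subst hc
        simp [PySem.Chars.splitOnMax.go, List.isPrefixOf, pv_go_zero]
      · have : [':'].isPrefixOf (c :: rest) = false := by
          simp [List.isPrefixOf]; exact fun h => absurd h.symm hc
        simp only [PySem.Chars.splitOnMax.go, this]
        rw [if_neg (by simp), ih (c :: cur) acc f (by simpa using Nat.lt_of_succ_lt_succ h)]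
        by_cases hm : ':' ∈ rest <;>
          simp [hm, hc, Ne.symm hc]

-- split(":", 1) characterised: one split at the first colon, or the whole line
theorem pv_split1 (cs : List Char) :
    PySem.Chars.splitOnMax cs [':'] 1 =
      (if ':' ∈ cs then [cs.takeWhile (· ≠ ':'), (cs.dropWhile (· ≠ ':')).tail] else [cs]) := by
  unfold PySem.Chars.splitOnMax
  rw [if_neg (by norm_num)]
  simp only [Int.toNat_one]
  rw [pv_go_one cs [] [] (cs.length + 1) (Nat.lt_succ_self _)]
  by_cases h : ':' ∈ cs <;> simp [h]

theorem pv_lowerChar_colon (c : Char) : (PySem.Chars.lowerChar c = ':') ↔ c = ':' := by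
  unfold PySem.Chars.lowerChar PySem.Chars.isupper
  split_ifs with h
  · constructor
    · intro he
      exfalso
      have hb : 65 ≤ c.toNat ∧ c.toNat ≤ 90 := by
        simpa [Char.le_def] using h
      have hv : (Char.ofNat (c.toNat + 32)).toNat = c.toNat + 32 := by
        rw [Char.toNat_ofNat, if_pos]
        exact Or.inl (by omega)
      have h2 : (':' : Char).toNat = c.toNat + 32 := by rw [← he, hv]
      have h3 : (':' : Char).toNat = 58 := rfl
      omega
    · intro he
      subst he
      simp [Char.le_def] at h
  · exact Iff.rfl

-- the guard: lower(line).startswith(kw + ":") iff line has a colon and the lowercased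
-- part before the first colon is exactly kw
theorem pv_guard (cs : List Char) : ∀ (kw : List Char), ':' ∉ kw →
    PySem.Chars.startswith (PySem.Chars.lower cs) (kw ++ [':']) =
      (decide (':' ∈ cs) && (PySem.Chars.lower (cs.takeWhile (· ≠ ':')) == kw)) := by
  induction cs with
  | nil =>
    intro kw hkw
    simp [PySem.Chars.startswith, PySem.Chars.lower]
  | cons c rest ih =>
    intro kw hkw
    by_cases hc : c = ':'
    · subst hc
      cases kw with
      | nil => simp [PySem.Chars.startswith, PySem.Chars.lower, List.isPrefixOf, PySem.Chars.lowerChar, PySem.Chars.isupper]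
      | cons k kw' =>
        have hk : k ≠ ':' := fun h => hkw (by simp [h])
        simp [PySem.Chars.startswith, PySem.Chars.lower, List.isPrefixOf,
              PySem.Chars.lowerChar, PySem.Chars.isupper, hk]
    · have hlc : PySem.Chars.lowerChar c ≠ ':' := fun h => hc ((pv_lowerChar_colon c).mp h)
      cases kw with
      | nil =>
        simp [PySem.Chars.startswith, PySem.Chars.lower, List.isPrefixOf, hc, Ne.symm hc]
        exact fun h => hlc h.symm
      | cons k kw' =>
        have hkw' : ':' ∉ kw' := fun h => hkw (by simp [h])
        have := ih kw' hkw'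
        simp only [PySem.Chars.startswith, PySem.Chars.lower, List.map_cons, List.cons_append,
          List.isPrefixOf, List.takeWhile_cons, if_pos (by simpa using hc : (decide (c ≠ ':')) = true)] at *
        rw [this]
        simp [Ne.symm hc, BEq.comm, Bool.and_left_comm]

-- one line: A's dispatch step on the assembled dict equals assembling after B's index step
theorem pv_step (m : PySem.Dict String String) (raw : String) :
    pvAStep (pvAssemble m) raw = pvAssemble (pvAltStep m raw) := by
  unfold pvAStep pvAltStep pvAVal
  dsimp only
  generalize PySem.Str.strip raw = line
  have e1 : PySem.Str.startswith (PySem.Str.lower line) "verdict:" =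
      (decide (':' ∈ line.toList) && (PySem.Chars.lower (line.toList.takeWhile (· ≠ ':')) == "verdict".toList)) := by
    have h := pv_guard line.toList "verdict".toList (by decide)
    have he : ("verdict".toList ++ [':']) = "verdict:".toList := by decide
    rw [he] at h
    simpa using h
  have e2 : PySem.Str.startswith (PySem.Str.lower line) "risk_type:" =
      (decide (':' ∈ line.toList) && (PySem.Chars.lower (line.toList.takeWhile (· ≠ ':')) == "risk_type".toList)) := by
    have h := pv_guard line.toList "risk_type".toList (by decide)
    have he : ("risk_type".toList ++ [':']) = "risk_type:".toList := by decide
    rw [he] at h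
    simpa using h
  have e3 : PySem.Str.startswith (PySem.Str.lower line) "details:" =
      (decide (':' ∈ line.toList) && (PySem.Chars.lower (line.toList.takeWhile (· ≠ ':')) == "details".toList)) := by
    have h := pv_guard line.toList "details".toList (by decide)
    have he : ("details".toList ++ [':']) = "details:".toList := by decide
    rw [he] at h
    simpa using h
  by_cases hcolon : ':' ∈ line.toList
  · -- a colon is present: B indexes the line; A updates iff the key is one of the three
    have hp : (PySem.Str.splitMax? line ":" 1).getD [] =
        [String.ofList (line.toList.takeWhile (· ≠ ':')), String.ofList ((line.toList.dropWhile (· ≠ ':')).tail)] := by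
      simp [PySem.Str.splitMax?, PySem.Chars.splitMax?, pv_split1, hcolon]
    have hk : PySem.Str.lower ((PySem.List.pyGet? [String.ofList (line.toList.takeWhile (· ≠ ':')),
        String.ofList ((line.toList.dropWhile (· ≠ ':')).tail)] 0).getD "") =
        String.ofList (PySem.Chars.lower (line.toList.takeWhile (· ≠ ':'))) := by
      simp [PySem.List.pyGet?, PySem.List.pyIdx?, PySem.Str.lower]
    have hd : decide (':' ∈ line.toList) = true := by simp [hcolon]
    rw [e1, e2, e3, hp, hk, hd]
    simp only [Bool.true_and]
    rw [if_pos (show ([String.ofList (line.toList.takeWhile (· ≠ ':')),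
        String.ofList ((line.toList.dropWhile (· ≠ ':')).tail)].length = 2) from rfl)]
    generalize PySem.Chars.lower (line.toList.takeWhile (· ≠ ':')) = K
    generalize PySem.Str.strip ((PySem.List.pyGet? [String.ofList (line.toList.takeWhile (· ≠ ':')),
        String.ofList ((line.toList.dropWhile (· ≠ ':')).tail)] 1).getD "") = w
    by_cases h1 : K = "verdict".toList
    · subst h1
      rw [if_pos (by simp), show String.ofList ("verdict".toList) = "verdict" from rfl]
      unfold pvAssemble
      apply PySem.Dict.ext
      rw [PySem.Dict.items_insert_of_contains _ _ (by simp)]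
      simp [PySem.Dict.getD_insert]
      split_ifs <;> simp_all
    · rw [if_neg (by simpa using h1)]
      by_cases h2 : K = "risk_type".toList
      · subst h2
        rw [if_pos (by simp), show String.ofList ("risk_type".toList) = "risk_type" from rfl]
        unfold pvAssemble
        apply PySem.Dict.ext
        rw [PySem.Dict.items_insert_of_contains _ _ (by simp)]
        simp [PySem.Dict.getD_insert]
      · rw [if_neg (by simpa using h2)]
        by_cases h3 : K = "details".toList
        · subst h3
          rw [if_pos (by simp), show String.ofList ("details".toList) = "details" from rfl]
          unfold pvAssemble
          apply PySem.Dict.ext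
          rw [PySem.Dict.items_insert_of_contains _ _ (by simp)]
          simp [PySem.Dict.getD_insert]
        · -- some other key: A ignores the line, B's insert touches none of the three read keys
          rw [if_neg (by simpa using h3)]
          have n1 : ("verdict" : String) ≠ String.ofList K := by
            intro h; apply h1; have := congrArg String.toList h; simpa using this.symm
          have n2 : ("risk_type" : String) ≠ String.ofList K := by
            intro h; apply h2; have := congrArg String.toList h; simpa using this.symm
          have n3 : ("details" : String) ≠ String.ofList K := by
            intro h; apply h3; have := congrArg String.toList h; simpa using this.symm
          unfold pvAssemble
          simp [PySem.Dict.getD_insert, n1, n2, n3]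
  · -- no colon: both sides leave their state unchanged
    have hp : (PySem.Str.splitMax? line ":" 1).getD [] = [String.ofList line.toList] := by
      simp [PySem.Str.splitMax?, PySem.Chars.splitMax?, pv_split1, hcolon]
    have hd : decide (':' ∈ line.toList) = false := by simp [hcolon]
    rw [e1, e2, e3, hp, hd]
    simp

theorem pv_fold (lines : List String) : ∀ (m : PySem.Dict String String),
    lines.foldl pvAStep (pvAssemble m) = pvAssemble (lines.foldl pvAltStep m) := by
  induction lines with
  | nil => intro m; rfl
  | cons l t ih => intro m; simp only [List.foldl_cons, pv_step, ih]

-- ===== VERDICT (by name: the statement is the Claim_ definition above) =====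
theorem parse_scan_output_py_spec : Claim_equal_parse_scan_output_py := by
  intro text _
  unfold Spec_parse_scan_output_py parse_scan_output_py parse_scan_output_py_alt
  have h0 : (PySem.Dict.ofList [("status", "error"), ("risk_type", "none"), ("details", "")] : PySem.Dict String String)
      = pvAssemble PySem.Dict.empty := by rfl
  rw [h0, pv_fold]
  rfl
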